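-- pv_equiv track=rewrite | github.com/educacionbe-online/iredmail.iredadmin | libs/ldaplib/ldaputils.py | extractValueFromDN
-- ===== SOURCE A (Python) =====
-- def extractValueFromDN(dn, attr):
--     """Extract value of attribute from dn string."""
--     dn = str(dn).strip().lower()
--     attr = str(attr).strip().lower()
--
--     for i in dn.split(','):
--         if i.startswith(attr + '='):
--             domain = i.split('=')[1]
--             break
--         else:
--             domain = None
--
--     return domain
-- ===== SOURCE B (Python) =====
-- def extractValueFromDN(dn, attr):
--     """Extract value of attribute from dn string."""
--     dn = str(dn).strip().lower()
--     attr = str(attr).strip().lower()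
--
--     table = {}
--     for i in dn.split(','):
--         p = i.split('=')
--         if len(p) > 1 and p[0] not in table:
--             table[p[0]] = p[1]
--
--     return table.get(attr)
-- ===== Notes on version B (the rewrite author's own statement) =====
-- stated objective: alternative
-- what changed: Replaces the scan-with-break over DN components by a single pass that builds a first-occurrence-wins key->value table from the components and then does one dictionary lookup of the attribute.
-- outside the precondition, e.g. on extractValueFromDN('a=b=c', 'a=b'): A returns 'b', B returns None
import Mathlib
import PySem

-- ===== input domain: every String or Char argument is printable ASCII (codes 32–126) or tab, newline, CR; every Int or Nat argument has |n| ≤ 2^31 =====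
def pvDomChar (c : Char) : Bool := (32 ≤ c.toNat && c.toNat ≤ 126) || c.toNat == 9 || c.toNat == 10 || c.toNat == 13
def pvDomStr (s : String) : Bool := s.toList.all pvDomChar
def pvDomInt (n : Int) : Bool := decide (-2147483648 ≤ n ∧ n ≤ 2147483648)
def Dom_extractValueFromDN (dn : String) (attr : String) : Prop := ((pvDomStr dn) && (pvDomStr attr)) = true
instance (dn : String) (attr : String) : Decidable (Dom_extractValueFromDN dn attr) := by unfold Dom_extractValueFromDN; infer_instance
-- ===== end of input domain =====

-- B replaces A's scan-with-break over the DN components by one pass building a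
-- first-occurrence-wins key→value table, then a single dictionary lookup (objective: alternative).

-- ===== PORT A =====
-- the for-loop of A: each non-matching component resets domain to None; a match breaks with i.split('=')[1]
def pvLoopA (attr : List Char) : List (List Char) → Option (List Char)
  | [] => none
  | i :: rest =>
    if PySem.Chars.startswith i (attr ++ ['=']) then
      PySem.List.pyGet? (PySem.Chars.splitOn i ['=']) 1   -- i.split('=')[1] (always in range when the guard holds)
    else pvLoopA attr rest

def extractValueFromDN (dn : String) (attr : String) : Option String :=
  let dnl := PySem.Chars.lower (PySem.Chars.strip dn.toList)
  let attrl := PySem.Chars.lower (PySem.Chars.strip attr.toList)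
  (pvLoopA attrl (PySem.Chars.splitOn dnl [','])).map (fun v => String.ofList v)

-- ===== PORT B =====
-- p = i.split('='); if len(p) > 1 and p[0] not in table: table[p[0]] = p[1]
def pvStepB (d : PySem.Dict (List Char) (List Char)) (i : List Char) : PySem.Dict (List Char) (List Char) :=
  match PySem.Chars.splitOn i ['='] with
  | k :: v :: _ => if d.contains k then d else d.insert k v
  | _ => d

def extractValueFromDN_alt (dn : String) (attr : String) : Option String :=
  let dnl := PySem.Chars.lower (PySem.Chars.strip dn.toList)
  let attrl := PySem.Chars.lower (PySem.Chars.strip attr.toList)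
  ((((PySem.Chars.splitOn dnl [',']).foldl pvStepB PySem.Dict.empty).get? attrl).map (fun v => String.ofList v))

-- ===== PRECONDITION & SPEC =====
-- Pre_ excludes only the pairs where attr contains '=' AND some DN component starts with
-- attr + '=': there A's prefix test matches across the key/value boundary of the component
-- and returns a value, while B's table (keyed by the '='-free text before a component's
-- first '=') returns None; both are defensible for a malformed attribute name.
def Pre_extractValueFromDN (dn : String) (attr : String) : Prop :=
  '=' ∉ attr.toList ∨
    ∀ i ∈ PySem.Chars.splitOn (PySem.Chars.lower (PySem.Chars.strip dn.toList)) [','],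
      PySem.Chars.startswith i (PySem.Chars.lower (PySem.Chars.strip attr.toList) ++ ['=']) = false
instance (dn : String) (attr : String) : Decidable (Pre_extractValueFromDN dn attr) := by unfold Pre_extractValueFromDN; infer_instance
def pvWitness_extractValueFromDN : String × String := ("ou=Users,dc=Example,dc=com", "dc")

def Spec_extractValueFromDN (dn : String) (attr : String) (out : Option String) : Prop := out = extractValueFromDN_alt dn attr
instance (dn : String) (attr : String) (out : Option String) : Decidable (Spec_extractValueFromDN dn attr out) := by unfold Spec_extractValueFromDN; infer_instance

-- ===== CLAIM (what is proved, stated in full; the proofs are below) =====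
def Claim_equal_extractValueFromDN : Prop := ∀ (dn : String) (attr : String), Dom_extractValueFromDN dn attr → Pre_extractValueFromDN dn attr → Spec_extractValueFromDN dn attr (extractValueFromDN dn attr)

-- ===== LEMMAS AND PROOFS =====

-- reference form of s.split('=') used only in the proofs
def pvSplit (l : List Char) : List (List Char) :=
  if h : '=' ∈ l then
    l.takeWhile (· != '=') :: pvSplit ((l.dropWhile (· != '=')).tail)
  else [l]
termination_by l.length
decreasing_by
  have hne : l.dropWhile (· != '=') ≠ [] := by
    intro hnil
    have := (List.dropWhile_eq_nil_iff).1 hnil '=' h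
    simp at this
  have hle : (l.dropWhile (· != '=')).length ≤ l.length := (List.dropWhile_sublist _).length_le
  have : 0 < (l.dropWhile (· != '=')).length := List.length_pos_iff.2 hne
  simp [List.length_tail]
  omega

lemma pvSplit_ne_nil (l : List Char) : pvSplit l ≠ [] := by
  unfold pvSplit; split <;> simp

lemma pvSplit_of_not_mem {l : List Char} (h : '=' ∉ l) : pvSplit l = [l] := by
  unfold pvSplit; simp [h]

lemma pvSplit_of_mem {l : List Char} (h : '=' ∈ l) :
    pvSplit l = l.takeWhile (· != '=') :: pvSplit ((l.dropWhile (· != '=')).tail) := by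
  conv_lhs => unfold pvSplit
  simp [h]

lemma pvGo_eq (fuel : Nat) : ∀ (l : List Char) (cur : List Char) (acc : List (List Char)),
    l.length < fuel →
    PySem.Chars.splitOn.go ['='] fuel l cur acc = acc.reverse ++ (pvSplit l).modifyHead (cur.reverse ++ ·) := by
  induction fuel with
  | zero => intro l cur acc h; omega
  | succ fuel ih =>
    intro l cur acc h
    cases l with
    | nil =>
      simp [PySem.Chars.splitOn.go, pvSplit_of_not_mem (by simp : '=' ∉ ([] : List Char))]
    | cons c rest =>
      by_cases hc : c = '='
      · subst hc
        have hstep : PySem.Chars.splitOn.go ['='] (fuel+1) ('=' :: rest) cur acc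
            = PySem.Chars.splitOn.go ['='] fuel rest [] (cur.reverse :: acc) := by
          simp [PySem.Chars.splitOn.go, List.isPrefixOf]
        rw [hstep, ih rest [] (cur.reverse :: acc) (by simp at h; omega)]
        have hm : '=' ∈ ('=' :: rest) := by simp
        rw [pvSplit_of_mem hm]
        simp [List.takeWhile, List.dropWhile]
        cases pvSplit rest <;> simp [List.modifyHead]
      · have hstep : PySem.Chars.splitOn.go ['='] (fuel+1) (c :: rest) cur acc
            = PySem.Chars.splitOn.go ['='] fuel rest (c :: cur) acc := by
          simp [PySem.Chars.splitOn.go, List.isPrefixOf, (by simpa using Ne.symm hc : ('=' == c) = false)]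
        rw [hstep, ih rest (c :: cur) acc (by simp at h; omega)]
        have hcb : (c != '=') = true := by simp [hc]
        by_cases hm : '=' ∈ rest
        · rw [pvSplit_of_mem (by simp [hm] : '=' ∈ (c :: rest)), pvSplit_of_mem hm]
          simp [List.takeWhile, List.dropWhile, hcb]
        · rw [pvSplit_of_not_mem hm, pvSplit_of_not_mem (by simp [hm, eq_comm, hc] : '=' ∉ (c :: rest))]
          simp

lemma pvSplitOn_eq (l : List Char) : PySem.Chars.splitOn l ['='] = pvSplit l := by
  have h := pvGo_eq (l.length + 1) l [] [] (by omega)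
  simp only [List.reverse_nil, List.nil_append] at h
  rw [show PySem.Chars.splitOn l ['='] = PySem.Chars.splitOn.go ['='] (l.length + 1) l [] [] from rfl, h]
  cases pvSplit l <;> simp [List.modifyHead]

lemma pvTakeWhile_eq_self {a : List Char} (ha : '=' ∉ a) : a.takeWhile (· != '=') = a := by
  rw [List.takeWhile_eq_self_iff]
  intro x hx
  simp only [bne_iff_ne, ne_eq]
  intro hxe; exact ha (hxe ▸ hx)

lemma pvStarts_iff {a : List Char} (i : List Char) (ha : '=' ∉ a) :
    PySem.Chars.startswith i (a ++ ['=']) = true ↔ ('=' ∈ i ∧ i.takeWhile (· != '=') = a) := by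
  rw [show PySem.Chars.startswith i (a ++ ['=']) = (a ++ ['=']).isPrefixOf i from rfl,
    List.isPrefixOf_iff_prefix]
  constructor
  · rintro ⟨t, ht⟩
    have hi : i = a ++ '=' :: t := by simpa using ht.symm
    subst hi
    refine ⟨by simp, ?_⟩
    rw [List.takeWhile_append]
    simp [pvTakeWhile_eq_self ha, List.takeWhile]
  · rintro ⟨hm, htw⟩
    have hne : i.dropWhile (· != '=') ≠ [] := by
      intro hnil
      have := (List.dropWhile_eq_nil_iff).1 hnil '=' hm
      simp at this
    have hdw : i.dropWhile (· != '=') = '=' :: (i.dropWhile (· != '=')).tail := by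
      cases hx : i.dropWhile (· != '=') with
      | nil => exact absurd hx hne
      | cons d0 dt =>
        have hh := List.head_dropWhile_not (· != '=') hne
        simp only [hx, List.head_cons] at hh
        simp only [bne_eq_false_iff_eq] at hh
        simp [hh]
    have hi : i = a ++ ('=' :: (i.dropWhile (· != '=')).tail) := by
      conv_lhs => rw [← List.takeWhile_append_dropWhile (p := (· != '=')) (l := i), htw, hdw]
    refine ⟨(i.dropWhile (· != '=')).tail, ?_⟩
    conv_rhs => rw [hi]
    simp

-- A's loop equals the table lookup, with any already-built table in front
lemma pvInv {a : List Char} (ha : '=' ∉ a) :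
    ∀ (parts : List (List Char)) (d : PySem.Dict (List Char) (List Char)),
      (parts.foldl pvStepB d).get? a = (d.get? a).or (pvLoopA a parts) := by
  intro parts
  induction parts with
  | nil => intro d; simp [pvLoopA]
  | cons i rest ih =>
    intro d
    rw [List.foldl_cons, ih (pvStepB d i)]
    by_cases hm : '=' ∈ i
    · have hsplit : PySem.Chars.splitOn i ['='] = i.takeWhile (· != '=') :: pvSplit ((i.dropWhile (· != '=')).tail) := by
        rw [pvSplitOn_eq, pvSplit_of_mem hm]
      obtain ⟨v, tl, hvt⟩ : ∃ v tl, pvSplit ((i.dropWhile (· != '=')).tail) = v :: tl := by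
        cases hx : pvSplit ((i.dropWhile (· != '=')).tail) with
        | nil => exact absurd hx (pvSplit_ne_nil _)
        | cons v tl => exact ⟨v, tl, rfl⟩
      by_cases hk : i.takeWhile (· != '=') = a
      · have hsw : PySem.Chars.startswith i (a ++ ['=']) = true := (pvStarts_iff i ha).2 ⟨hm, hk⟩
        have hloop : pvLoopA a (i :: rest) = some v := by
          simp only [pvLoopA, hsw, if_true, hsplit, hvt]
          simp [PySem.List.pyGet?, PySem.List.pyIdx?]
        by_cases hc : d.contains a = true
        · obtain ⟨w, hw⟩ := Option.isSome_iff_exists.1 ((PySem.Dict.contains_eq_isSome_get? d a) ▸ hc)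
          have hstep : pvStepB d i = d := by simp [pvStepB, hsplit, hvt, hk, hc]
          rw [hstep, hloop, hw]
          simp
        · have hget : d.get? a = none := (PySem.Dict.get?_eq_none_iff_contains d a).2 (by simpa using hc)
          have hstep : pvStepB d i = d.insert a v := by simp [pvStepB, hsplit, hvt, hk, hc]
          rw [hstep, hloop, hget, PySem.Dict.get?_insert_self]
          simp
      · have hsw : PySem.Chars.startswith i (a ++ ['=']) = false := by
          rw [Bool.eq_false_iff]
          intro hT
          exact hk ((pvStarts_iff i ha).1 hT).2
        have hloop : pvLoopA a (i :: rest) = pvLoopA a rest := by simp [pvLoopA, hsw]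
        have hstep : (pvStepB d i).get? a = d.get? a := by
          simp only [pvStepB, hsplit, hvt]
          split
          · rfl
          · exact PySem.Dict.get?_insert_of_ne _ _ (Ne.symm hk)
        rw [hstep, hloop]
    · have hsplit : PySem.Chars.splitOn i ['='] = [i] := by
        rw [pvSplitOn_eq, pvSplit_of_not_mem hm]
      have hstep : pvStepB d i = d := by simp [pvStepB, hsplit]
      have hsw : PySem.Chars.startswith i (a ++ ['=']) = false := by
        rw [Bool.eq_false_iff]
        intro hT
        exact hm ((pvStarts_iff i ha).1 hT).1
      have hloop : pvLoopA a (i :: rest) = pvLoopA a rest := by simp [pvLoopA, hsw]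
      rw [hstep, hloop]

lemma pvLowerChar_eq {c : Char} (h : PySem.Chars.lowerChar c = '=') : c = '=' := by
  unfold PySem.Chars.lowerChar at h
  split at h
  · exfalso
    rename_i hu
    unfold PySem.Chars.isupper at hu
    simp only [Bool.and_eq_true, decide_eq_true_eq] at hu
    have h1 : (65 : Nat) ≤ c.toNat := Nat.succ_le_of_lt (Char.le_def.mp hu.1)
    have h2 : c.toNat ≤ 90 := Fin.mk_le_mk.mp (Char.le_def.mp hu.2)
    have hv : (Char.ofNat (c.toNat + 32)).toNat = c.toNat + 32 := by
      rw [Char.toNat_ofNat, if_pos (Or.inl (by omega))]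
    have heq : (Char.ofNat (c.toNat + 32)).toNat = ('=' : Char).toNat := by rw [h]
    have h61 : ('=' : Char).toNat = 61 := by decide
    rw [hv, h61] at heq
    omega
  · exact h

lemma pvPre_attrl {attr : String} (h : '=' ∉ attr.toList) :
    '=' ∉ PySem.Chars.lower (PySem.Chars.strip attr.toList) := by
  intro hmem
  unfold PySem.Chars.lower at hmem
  obtain ⟨c, hc, hcl⟩ := List.mem_map.1 hmem
  have hce : c = '=' := pvLowerChar_eq hcl
  rw [hce] at hc
  apply h
  unfold PySem.Chars.strip PySem.Chars.rstrip PySem.Chars.lstrip at hc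
  have h1 : '=' ∈ (attr.toList.dropWhile PySem.Chars.isspace) := by
    have h2 := List.mem_reverse.1 hc
    have h3 := (List.dropWhile_sublist PySem.Chars.isspace).mem h2
    exact List.mem_reverse.1 h3
  exact (List.dropWhile_sublist _).mem h1

lemma pvLoopA_none {a : List Char} {parts : List (List Char)}
    (hall : ∀ i ∈ parts, PySem.Chars.startswith i (a ++ ['=']) = false) : pvLoopA a parts = none := by
  induction parts with
  | nil => rfl
  | cons i rest ih =>
    simp only [pvLoopA, hall i (by simp), if_false, Bool.false_eq_true]
    exact ih (fun j hj => hall j (by simp [hj]))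

lemma pvStep_get_none {a : List Char} (ha : '=' ∈ a)
    (d : PySem.Dict (List Char) (List Char)) (i : List Char)
    (hd : d.get? a = none) : (pvStepB d i).get? a = none := by
  by_cases hm : '=' ∈ i
  · have hsplit : PySem.Chars.splitOn i ['='] = i.takeWhile (· != '=') :: pvSplit ((i.dropWhile (· != '=')).tail) := by
      rw [pvSplitOn_eq, pvSplit_of_mem hm]
    obtain ⟨v, tl, hvt⟩ : ∃ v tl, pvSplit ((i.dropWhile (· != '=')).tail) = v :: tl := by
      cases hx : pvSplit ((i.dropWhile (· != '=')).tail) with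
      | nil => exact absurd hx (pvSplit_ne_nil _)
      | cons v tl => exact ⟨v, tl, rfl⟩
    have hk : a ≠ i.takeWhile (· != '=') := by
      intro he
      have := List.mem_takeWhile_imp (he ▸ ha)
      simp at this
    simp only [pvStepB, hsplit, hvt]
    split
    · exact hd
    · rw [PySem.Dict.get?_insert_of_ne _ _ hk]; exact hd
  · have hsplit : PySem.Chars.splitOn i ['='] = [i] := by
      rw [pvSplitOn_eq, pvSplit_of_not_mem hm]
    simpa [pvStepB, hsplit] using hd

lemma pvFold_get_none {a : List Char} (ha : '=' ∈ a) :
    ∀ (parts : List (List Char)) (d : PySem.Dict (List Char) (List Char)),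
      d.get? a = none → (parts.foldl pvStepB d).get? a = none := by
  intro parts
  induction parts with
  | nil => intro d hd; exact hd
  | cons i rest ih => intro d hd; exact ih _ (pvStep_get_none ha d i hd)

-- ===== VERDICT (by name: the statement is the Claim_ definition above) =====
theorem extractValueFromDN_spec : Claim_equal_extractValueFromDN := by
  intro dn attr _ hpre
  show extractValueFromDN dn attr = extractValueFromDN_alt dn attr
  show (pvLoopA (PySem.Chars.lower (PySem.Chars.strip attr.toList))
          (PySem.Chars.splitOn (PySem.Chars.lower (PySem.Chars.strip dn.toList)) [','])).map (fun v => String.ofList v)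
      = (((PySem.Chars.splitOn (PySem.Chars.lower (PySem.Chars.strip dn.toList)) [',']).foldl pvStepB
            PySem.Dict.empty).get? (PySem.Chars.lower (PySem.Chars.strip attr.toList))).map (fun v => String.ofList v)
  by_cases ha : '=' ∈ PySem.Chars.lower (PySem.Chars.strip attr.toList)
  · have hall : ∀ i ∈ PySem.Chars.splitOn (PySem.Chars.lower (PySem.Chars.strip dn.toList)) [','],
        PySem.Chars.startswith i (PySem.Chars.lower (PySem.Chars.strip attr.toList) ++ ['=']) = false := by
      rcases hpre with h | h
      · exact absurd ha (pvPre_attrl h)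
      · exact h
    rw [pvLoopA_none hall, pvFold_get_none ha _ PySem.Dict.empty (PySem.Dict.get?_empty _)]
  · rw [pvInv ha _ PySem.Dict.empty, PySem.Dict.get?_empty, Option.none_or]
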